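-- pv_equiv track=rewrite | github.com/JaviMiot/E2R_data_assigment_analisys | scripts/part3/prepare_part3_analysis_dataset.py | derive_tool_family
-- ===== SOURCE A (Python) =====
-- from typing import Iterable, Optional
--
-- TOOL_FAMILY_MAP = {
--     "ChatGPT": "llm",
--     "Gemini": "llm",
--     "Claude": "llm",
--     "Perplexity": "llm",
--     "FACILE": "accessibility_tool",
--     "ReadEasy.ai": "accessibility_tool",
-- }
--
-- def derive_tool_family(tool_names: Iterable[str]) -> str:
--     """Return the family for one or more canonical tools."""
--     families = {
--         TOOL_FAMILY_MAP.get(tool_name, "unknown")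
--         for tool_name in tool_names
--         if tool_name
--     }
--     families.discard("unknown")
--
--     if not families:
--         return "llm"
--     if len(families) > 1:
--         return "hybrid"
--     return next(iter(families))
-- ===== SOURCE B (Python) =====
-- TOOL_FAMILY_MAP = {
--     "ChatGPT": "llm",
--     "Gemini": "llm",
--     "Claude": "llm",
--     "Perplexity": "llm",
--     "FACILE": "accessibility_tool",
--     "ReadEasy.ai": "accessibility_tool",
-- }
--
-- def derive_tool_family(tool_names):
--     """Single pass with one scalar accumulator; short-circuits to 'hybrid'."""
--     found = None
--     for name in tool_names:
--         if not name:
--             continue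
--         fam = TOOL_FAMILY_MAP.get(name, "unknown")
--         if fam == "unknown":
--             continue
--         if found is None:
--             found = fam
--         elif fam != found:
--             return "hybrid"
--     return "llm" if found is None else found
-- ===== Notes on version B (the rewrite author's own statement) =====
-- stated objective: simpler
-- what changed: Replaces the set comprehension plus discard/len/next(iter(...)) decision with a single loop over the names that keeps one scalar accumulator (the first known family seen) and returns 'hybrid' immediately on the first conflicting family.
import Mathlib
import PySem

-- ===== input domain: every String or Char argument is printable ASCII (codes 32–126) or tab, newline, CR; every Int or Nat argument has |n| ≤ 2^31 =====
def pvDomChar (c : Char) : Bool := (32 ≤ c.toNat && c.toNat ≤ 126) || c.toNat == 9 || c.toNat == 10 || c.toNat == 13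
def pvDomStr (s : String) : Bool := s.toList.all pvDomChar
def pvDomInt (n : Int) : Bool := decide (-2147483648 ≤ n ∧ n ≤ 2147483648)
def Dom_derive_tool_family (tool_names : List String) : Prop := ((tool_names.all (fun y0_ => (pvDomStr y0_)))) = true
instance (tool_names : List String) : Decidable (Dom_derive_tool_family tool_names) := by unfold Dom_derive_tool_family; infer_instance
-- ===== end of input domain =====

-- B replaces A's set-building comprehension by a single scalar accumulator with an early
-- 'hybrid' exit (objective: simpler).

-- ===== PORT A =====
def famMap : PySem.Dict String String := PySem.Dict.ofList
  [("ChatGPT", "llm"), ("Gemini", "llm"), ("Claude", "llm"), ("Perplexity", "llm"),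
   ("FACILE", "accessibility_tool"), ("ReadEasy.ai", "accessibility_tool")]

def derive_tool_family (tool_names : List String) : String :=
  let families : PySem.Set String :=
    tool_names.foldl
      (fun s tool_name =>
        if tool_name ≠ "" then PySem.Set.add s (famMap.getD tool_name "unknown") else s)
      PySem.Set.empty
  let families := PySem.Set.discard families "unknown"
  if families = [] then "llm"
  else if 1 < PySem.Set.len families then "hybrid"
  else families.headD ""   -- next(iter(families)): the set is a singleton here, so order-independent

-- ===== PORT B =====
def altLoop : List String → Option String → String
  | [], found => match found with | none => "llm" | some f => f
  | name :: rest, found =>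
    if name = "" then altLoop rest found
    else
      let fam := famMap.getD name "unknown"
      if fam = "unknown" then altLoop rest found
      else
        match found with
        | none => altLoop rest (some fam)
        | some f => if fam ≠ f then "hybrid" else altLoop rest found

def derive_tool_family_alt (tool_names : List String) : String :=
  altLoop tool_names none

-- ===== PRECONDITION & SPEC =====
def Spec_derive_tool_family (tool_names : List String) (out : String) : Prop := out = derive_tool_family_alt tool_names
instance (tool_names : List String) (out : String) : Decidable (Spec_derive_tool_family tool_names out) := by unfold Spec_derive_tool_family; infer_instance

-- ===== CLAIM (what is proved, stated in full; the proofs are below) =====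
def Claim_equal_derive_tool_family : Prop := ∀ (tool_names : List String), Dom_derive_tool_family tool_names → Spec_derive_tool_family tool_names (derive_tool_family tool_names)

-- ===== LEMMAS AND PROOFS =====

-- every lookup in famMap yields one of three families
theorem fam_cases (t : String) :
    famMap.getD t "unknown" = "llm" ∨ famMap.getD t "unknown" = "accessibility_tool" ∨
    famMap.getD t "unknown" = "unknown" := by
  have h : famMap = PySem.Dict.mk
      [("ChatGPT", "llm"), ("Gemini", "llm"), ("Claude", "llm"), ("Perplexity", "llm"),
       ("FACILE", "accessibility_tool"), ("ReadEasy.ai", "accessibility_tool")] := by decide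
  simp only [h, PySem.Dict.getD_eq_get?_getD, PySem.Dict.get?_mk_cons]
  repeat' split
  all_goals simp_all [PySem.Dict.get?]

-- whether some non-empty name of l maps to family fam
def seen (fam : String) (l : List String) : Bool :=
  l.any (fun t => t ≠ "" && famMap.getD t "unknown" == fam)

-- the decision as a function of which of the two families occurs
def verdict (a b : Bool) : String :=
  if a && b then "hybrid" else if a then "llm" else if b then "accessibility_tool" else "llm"

theorem seen_cons (fam : String) (t : String) (l : List String) :
    seen fam (t :: l) = ((t ≠ "" && famMap.getD t "unknown" == fam) || seen fam l) := by
  simp [seen]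

theorem altLoop_char : ∀ (l : List String) (found : Option String),
    found = none ∨ found = some "llm" ∨ found = some "accessibility_tool" →
    altLoop l found =
      verdict ((found == some "llm") || seen "llm" l)
              ((found == some "accessibility_tool") || seen "accessibility_tool" l) := by
  intro l
  induction l with
  | nil =>
    intro found h
    rcases h with h | h | h <;> subst h <;> rfl
  | cons t rest ih =>
    intro found h
    by_cases ht : t = ""
    · subst ht
      simp only [altLoop, seen_cons]
      rw [ih found h]; simp
    · rcases fam_cases t with hf | hf | hf
      · -- fam = "llm"
        rcases h with h | h | h <;> subst h
        · simp only [altLoop, if_neg ht, hf]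
          rw [ih (some "llm") (by simp)]
          simp [seen_cons, ht, hf, verdict]
        · simp only [altLoop, if_neg ht, hf]
          rw [ih (some "llm") (by simp)]
          simp [seen_cons, ht, hf, verdict]
        · simp only [altLoop, if_neg ht, hf]
          simp [seen_cons, ht, hf, verdict]
      · -- fam = "accessibility_tool"
        rcases h with h | h | h <;> subst h
        · simp only [altLoop, if_neg ht, hf]
          rw [ih (some "accessibility_tool") (by simp)]
          simp [seen_cons, ht, hf, verdict]
        · simp only [altLoop, if_neg ht, hf]
          simp [seen_cons, ht, hf, verdict]
        · simp only [altLoop, if_neg ht, hf]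
          rw [ih (some "accessibility_tool") (by simp)]
          simp [seen_cons, ht, hf, verdict]
      · -- fam = "unknown"
        simp only [altLoop, if_neg ht, hf]
        rw [ih found h]
        simp [seen_cons, ht, hf]

-- A's tail: discard "unknown", then the three-way branch
def finishA (s : PySem.Set String) : String :=
  let d := PySem.Set.discard s "unknown"
  if d = [] then "llm" else if 1 < PySem.Set.len d then "hybrid" else d.headD ""

theorem finishA_char (s : PySem.Set String) (hn : s.Nodup)
    (hs : ∀ x ∈ s, x = "llm" ∨ x = "accessibility_tool" ∨ x = "unknown") :
    finishA s = verdict (decide ("llm" ∈ s)) (decide ("accessibility_tool" ∈ s)) := by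
  have hdn : (PySem.Set.discard s "unknown").Nodup := PySem.Set.nodup_discard s "unknown" hn
  have hdm : ∀ x, x ∈ PySem.Set.discard s "unknown" ↔ (x ∈ s ∧ x ≠ "unknown") := by
    exact PySem.Set.mem_discard s "unknown"
  by_cases hl : "llm" ∈ s <;> by_cases ha : "accessibility_tool" ∈ s
  · -- both present: discard has two distinct elements
    have h1 : "llm" ∈ PySem.Set.discard s "unknown" := (hdm _).2 ⟨hl, by decide⟩
    have h2 : "accessibility_tool" ∈ PySem.Set.discard s "unknown" := (hdm _).2 ⟨ha, by decide⟩
    have hlen : 2 ≤ (PySem.Set.discard s "unknown").length := by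
      rcases List.getElem_of_mem h1 with ⟨i, hi, hgi⟩
      rcases List.getElem_of_mem h2 with ⟨j, hj, hgj⟩
      have : i ≠ j := by intro h; subst h; rw [hgi] at hgj; exact absurd hgj (by decide)
      omega
    have hne : PySem.Set.discard s "unknown" ≠ [] := by
      intro h; rw [h] at h1; exact absurd h1 (List.not_mem_nil)
    simp only [finishA, verdict, hl, ha, PySem.Set.len]
    rw [if_neg hne, if_pos (by exact_mod_cast hlen)]
    simp
  · -- only "llm"
    have : PySem.Set.discard s "unknown" = ["llm"] := by
      have hall : ∀ x ∈ PySem.Set.discard s "unknown", x = "llm" := by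
        intro x hx
        rcases (hdm x).1 hx with ⟨hxs, hxu⟩
        rcases hs x hxs with h | h | h
        · exact h
        · exact absurd (h ▸ hxs) ha
        · exact absurd h hxu
      have h1 : "llm" ∈ PySem.Set.discard s "unknown" := (hdm _).2 ⟨hl, by decide⟩
      match hd : PySem.Set.discard s "unknown", hdn, h1, hall with
      | [], _, h1, _ => exact absurd h1 (List.not_mem_nil)
      | [x], _, _, hall => rw [hall x (by simp)]
      | x :: y :: r, hdn, _, hall =>
        exfalso
        have hx := hall x (by simp); have hy := hall y (by simp)
        rw [List.nodup_cons] at hdn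
        exact hdn.1 (by rw [hx, ← hy]; simp)
    simp only [finishA, verdict, hl, ha, this, PySem.Set.len]
    decide
  · -- only "accessibility_tool"
    have : PySem.Set.discard s "unknown" = ["accessibility_tool"] := by
      have hall : ∀ x ∈ PySem.Set.discard s "unknown", x = "accessibility_tool" := by
        intro x hx
        rcases (hdm x).1 hx with ⟨hxs, hxu⟩
        rcases hs x hxs with h | h | h
        · exact absurd (h ▸ hxs) hl
        · exact h
        · exact absurd h hxu
      have h1 : "accessibility_tool" ∈ PySem.Set.discard s "unknown" := (hdm _).2 ⟨ha, by decide⟩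
      match hd : PySem.Set.discard s "unknown", hdn, h1, hall with
      | [], _, h1, _ => exact absurd h1 (List.not_mem_nil)
      | [x], _, _, hall => rw [hall x (by simp)]
      | x :: y :: r, hdn, _, hall =>
        exfalso
        have hx := hall x (by simp); have hy := hall y (by simp)
        rw [List.nodup_cons] at hdn
        exact hdn.1 (by rw [hx, ← hy]; simp)
    simp only [finishA, verdict, hl, ha, this, PySem.Set.len]
    decide
  · -- neither: discard is empty
    have : PySem.Set.discard s "unknown" = [] := by
      apply List.eq_nil_iff_forall_not_mem.2
      intro x hx
      rcases (hdm x).1 hx with ⟨hxs, hxu⟩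
      rcases hs x hxs with h | h | h
      · exact hl (h ▸ hxs)
      · exact ha (h ▸ hxs)
      · exact hxu h
    simp [finishA, verdict, hl, ha, this]

def stepA (s : PySem.Set String) (t : String) : PySem.Set String :=
  if t ≠ "" then PySem.Set.add s (famMap.getD t "unknown") else s

theorem foldA_char : ∀ (l : List String) (s : PySem.Set String), s.Nodup →
    (∀ x ∈ s, x = "llm" ∨ x = "accessibility_tool" ∨ x = "unknown") →
    finishA (l.foldl stepA s) =
      verdict ((decide ("llm" ∈ s)) || seen "llm" l)
              ((decide ("accessibility_tool" ∈ s)) || seen "accessibility_tool" l) := by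
  intro l
  induction l with
  | nil =>
    intro s hn hs
    simp [seen, finishA_char s hn hs]
  | cons t rest ih =>
    intro s hn hs
    have hmem : ∀ fam y, y ∈ PySem.Set.add s fam ↔ y ∈ s ∨ y = fam := by
      intro fam y; exact PySem.Set.mem_add s fam y
    by_cases ht : t = ""
    · subst ht
      simp only [List.foldl_cons, stepA]
      rw [if_neg (by simp), ih s hn hs]
      simp [seen_cons]
    · simp only [List.foldl_cons, stepA, if_pos ht]
      have hn' : (PySem.Set.add s (famMap.getD t "unknown")).Nodup := PySem.Set.nodup_add s (famMap.getD t "unknown") hn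
      have hs' : ∀ x ∈ PySem.Set.add s (famMap.getD t "unknown"),
          x = "llm" ∨ x = "accessibility_tool" ∨ x = "unknown" := by
        intro x hx
        rcases (hmem _ x).1 hx with h | h
        · exact hs x h
        · rcases fam_cases t with hf | hf | hf
          · exact Or.inl (h.trans hf)
          · exact Or.inr (Or.inl (h.trans hf))
          · exact Or.inr (Or.inr (h.trans hf))
      rw [ih _ hn' hs']
      rcases fam_cases t with hf | hf | hf <;>
        simp [seen_cons, ht, hf, hmem, Bool.or_comm]

-- ===== VERDICT (by name: the statement is the Claim_ definition above) =====
theorem derive_tool_family_spec : Claim_equal_derive_tool_family := by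
  intro l _
  show derive_tool_family l = derive_tool_family_alt l
  have hA : derive_tool_family l = finishA (l.foldl stepA PySem.Set.empty) := rfl
  rw [hA, foldA_char l PySem.Set.empty (by simp [PySem.Set.empty]) (by simp [PySem.Set.empty]),
      derive_tool_family_alt, altLoop_char l none (Or.inl rfl)]
  simp [PySem.Set.empty]
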